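-- pv_equiv track=rewrite | github.com/hwyden/CodeHabitChallenge | day_4/solution_day4.py | repeat_sum
-- ===== SOURCE A (Python) =====
-- def repeat_sum(l):
--     num_frequency = {}
--
--     for sublist in l:
--         unique_numbers = set(sublist)
--
--         for x in unique_numbers:
--             num_frequency[x] = num_frequency.get(x, 0) + 1
--
--     result_sum = sum(x for x, freq in num_frequency.items() if freq >= 2)
--     return result_sum
-- ===== SOURCE B (Python) =====
-- def repeat_sum(l):
--     # Candidate-centric: collect all distinct numbers, then for each one
--     # count how many sublists contain it by scanning the sublists.
--     candidates = set()
--     for sublist in l: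
--         candidates.update(sublist)
--     total = 0
--     for x in candidates:
--         containing = 0
--         for sublist in l:
--             if x in sublist:
--                 containing += 1
--         if containing >= 2:
--             total += x
--     return total
-- ===== Notes on version B (the rewrite author's own statement) =====
-- stated objective: alternative
-- what changed: Replaces the accumulating frequency dict with a candidate-centric nested scan: build the set of distinct numbers once, then count containing sublists for each candidate by rescanning the input.
import Mathlib
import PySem

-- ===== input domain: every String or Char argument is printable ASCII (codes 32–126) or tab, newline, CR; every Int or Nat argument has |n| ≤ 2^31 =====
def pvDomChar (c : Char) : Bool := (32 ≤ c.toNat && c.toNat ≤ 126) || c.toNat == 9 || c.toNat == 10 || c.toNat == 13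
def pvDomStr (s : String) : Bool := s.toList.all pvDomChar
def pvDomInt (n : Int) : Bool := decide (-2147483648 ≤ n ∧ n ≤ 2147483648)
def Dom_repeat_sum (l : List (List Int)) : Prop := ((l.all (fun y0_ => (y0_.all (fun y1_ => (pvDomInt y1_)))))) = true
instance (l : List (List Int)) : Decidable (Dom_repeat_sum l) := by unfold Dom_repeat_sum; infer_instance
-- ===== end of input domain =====

-- B replaces A's accumulating frequency dict with a candidate-centric nested scan
-- (distinct numbers once, then count containing sublists per candidate); alternative decomposition, not faster.


-- ===== PORT A =====
def repeat_sum (l : List (List Int)) : Int :=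
  let num_frequency : PySem.Dict Int Int :=
    l.foldl (fun d sublist =>
      (PySem.Set.ofList sublist).foldl (fun d x => d.insert x (d.getD x 0 + 1)) d)
      PySem.Dict.empty
  ((num_frequency.items.filter (fun p => decide (2 ≤ p.2))).map (fun p => p.1)).sum

-- ===== PORT B =====
def repeat_sum_alt (l : List (List Int)) : Int :=
  let candidates : PySem.Set Int :=
    l.foldl (fun s sublist => PySem.Set.update s sublist) PySem.Set.empty
  candidates.foldl (fun total x =>
    let containing : Int :=
      l.foldl (fun c sublist => if sublist.contains x then c + 1 else c) 0
    if 2 ≤ containing then total + x else total) 0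

-- ===== PRECONDITION & SPEC =====
def Spec_repeat_sum (l : List (List Int)) (out : Int) : Prop := out = repeat_sum_alt l
instance (l : List (List Int)) (out : Int) : Decidable (Spec_repeat_sum l out) := by unfold Spec_repeat_sum; infer_instance

-- ===== CLAIM (what is proved, stated in full; the proofs are below) =====
def Claim_equal_repeat_sum : Prop := ∀ (l : List (List Int)), Dom_repeat_sum l → Spec_repeat_sum l (repeat_sum l)

-- ===== LEMMAS AND PROOFS =====

-- multiset of per-sublist-deduplicated elements that A's dict counts
def pvDedupFlat (l : List (List Int)) : List Int :=
  (l.map (fun s => PySem.Set.ofList s)).flatten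

theorem pvCount_ofList (s : List Int) (k : Int) :
    List.count k (PySem.Set.ofList s) = if s.contains k then 1 else 0 := by
  by_cases h : k ∈ s
  · simp [h]
  · have : k ∉ PySem.Set.ofList s := by simpa [PySem.Set.mem_ofList] using h
    simp [List.count_eq_zero_of_not_mem this, h]

theorem pvCount_dedupFlat (l : List (List Int)) (k : Int) :
    List.count k (pvDedupFlat l) = l.countP (fun s => s.contains k) := by
  induction l with
  | nil => simp [pvDedupFlat]
  | cons s t ih =>
      rw [show pvDedupFlat (s :: t) = PySem.Set.ofList s ++ pvDedupFlat t from rfl,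
        List.count_append, pvCount_ofList, ih, List.countP_cons]
      simp only [List.contains_eq_mem]
      exact Nat.add_comm _ _

theorem pvFoldl_if_add (p : Int → Bool) (xs : List Int) (acc : Int) :
    xs.foldl (fun t x => if p x then t + x else t) acc = acc + (xs.filter p).sum := by
  induction xs generalizing acc with
  | nil => simp
  | cons x xs ih =>
      by_cases h : p x
      · simp [h, ih]; ring
      · simp [h, ih]

theorem pvFoldl_dict (l : List (List Int)) (d : PySem.Dict Int Int) :
    l.foldl (fun d sublist =>
        (PySem.Set.ofList sublist).foldl (fun d x => d.insert x (d.getD x 0 + 1)) d) d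
      = (pvDedupFlat l).foldl (fun d x => d.insert x (d.getD x 0 + 1)) d := by
  induction l generalizing d with
  | nil => rfl
  | cons s t ih =>
      rw [show pvDedupFlat (s :: t) = PySem.Set.ofList s ++ pvDedupFlat t from rfl,
        List.foldl_append, List.foldl_cons, ih]

theorem pvA_eq (l : List (List Int)) :
    repeat_sum l =
      ((PySem.Set.ofList (pvDedupFlat l)).filter
        (fun k => decide (2 ≤ (l.countP (fun s => s.contains k) : Int)))).sum := by
  simp only [repeat_sum]
  rw [pvFoldl_dict, PySem.Dict.foldl_insert_getD_add_one_eq_counter, PySem.Dict.items_counter]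
  rw [List.filter_map, List.map_map]
  simp [Function.comp_def, pvCount_dedupFlat]

theorem pvB_eq (l : List (List Int)) :
    repeat_sum_alt l =
      ((PySem.Set.ofList l.flatten).filter
        (fun k => decide (2 ≤ (l.countP (fun s => s.contains k) : Int)))).sum := by
  simp only [repeat_sum_alt]
  rw [show (l.foldl (fun s sublist => PySem.Set.update s sublist) PySem.Set.empty)
      = PySem.Set.ofList l.flatten by
    rw [PySem.Set.ofList_eq_foldl, List.foldl_flatten]; rfl]
  have hbody : ∀ (total x : Int),
      (fun total x =>
        let containing : Int :=
          l.foldl (fun c sublist => if sublist.contains x then c + 1 else c) 0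
        if 2 ≤ containing then total + x else total) total x
      = (fun total x => if decide (2 ≤ (l.countP (fun s => s.contains x) : Int))
          then total + x else total) total x := by
    intro total x
    simp only [PySem.List.foldl_count_if (fun s => s.contains x) l 0, zero_add]
    simp
  rw [funext fun total => funext fun x => hbody total x]
  rw [pvFoldl_if_add, zero_add]

theorem pvPerm (l : List (List Int)) :
    (PySem.Set.ofList (pvDedupFlat l)).Perm (PySem.Set.ofList l.flatten) := by
  rw [List.perm_ext_iff_of_nodup (PySem.Set.nodup_ofList _) (PySem.Set.nodup_ofList _)]
  intro a
  simp [PySem.Set.mem_ofList, pvDedupFlat, List.mem_flatten]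

-- ===== VERDICT (by name: the statement is the Claim_ definition above) =====
theorem repeat_sum_spec : Claim_equal_repeat_sum := by
  intro l _
  show repeat_sum l = repeat_sum_alt l
  rw [pvA_eq, pvB_eq]
  exact ((pvPerm l).filter _).sum_eq
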